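-- pv_equiv track=rewrite | github.com/Maj1n777/dependency-visualizer | dependency_analyzer.py | bfs_load_order
-- ===== SOURCE A (Python) =====
-- from typing import Dict, List, Set, Tuple
-- from collections import deque, defaultdict
--
-- def bfs_load_order(graph: Dict[str, List[str]], start_package: str) -> List[str]:
--     visited = set()
--     queue = deque([start_package])
--     load_order = []
--
--     while queue:
--         level_size = len(queue)
--         level_packages = []
--
--         for _ in range(level_size):
--             current = queue.popleft()
--             if current not in visited:
--                 visited.add(current)
--                 level_packages.append(current)
--
--                 for dep in graph.get(current, []):
--                     if dep not in visited:
--                         queue.append(dep)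
--
--         level_packages.sort()
--         load_order.extend(level_packages)
--
--     return load_order
-- ===== SOURCE B (Python) =====
-- def bfs_load_order(graph, start_package):
--     # Bellman-Ford style distance computation instead of a queue: relax every
--     # edge len(graph)+1 times, giving each reachable package its shortest hop
--     # count; then emit the distance classes in increasing order, each sorted.
--     dist = {start_package: 0}
--     for _ in range(len(graph) + 1):
--         for node, deps in graph.items():
--             if node in dist:
--                 d1 = dist[node] + 1
--                 for dep in deps:
--                     if dep not in dist or dist[dep] > d1:
--                         dist[dep] = d1
--     order = []
--     for level in range(max(dist.values()) + 1):
--         order.extend(sorted(p for p in dist if dist[p] == level))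
--     return order
-- ===== Notes on version B (the rewrite author's own statement) =====
-- stated objective: alternative
-- what changed: Replaces A's queue-based level-batch BFS (per-level dequeue loop with interleaved sorting) by a Bellman-Ford-style computation: repeatedly relax every edge of the graph until each reachable package holds its shortest hop distance in a dict, then emit the distance classes 0..max in order, each sorted alphabetically.
import Mathlib
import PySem

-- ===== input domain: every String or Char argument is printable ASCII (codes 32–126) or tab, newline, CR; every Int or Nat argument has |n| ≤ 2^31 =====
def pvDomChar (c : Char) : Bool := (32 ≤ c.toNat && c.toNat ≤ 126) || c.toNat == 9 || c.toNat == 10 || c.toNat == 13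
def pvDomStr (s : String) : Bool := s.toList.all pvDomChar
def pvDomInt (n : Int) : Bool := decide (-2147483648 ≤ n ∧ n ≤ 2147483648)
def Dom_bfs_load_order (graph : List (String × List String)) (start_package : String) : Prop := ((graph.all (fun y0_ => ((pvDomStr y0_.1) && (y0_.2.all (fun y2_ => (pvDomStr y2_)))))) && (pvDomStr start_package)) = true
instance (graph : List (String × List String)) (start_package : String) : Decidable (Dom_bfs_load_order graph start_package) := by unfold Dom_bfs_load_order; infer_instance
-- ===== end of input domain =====

-- B replaces A's queue-based level-batch BFS by a Bellman-Ford-style relaxation: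
-- it computes each reachable package's shortest hop distance by repeated edge
-- relaxation (no queue), then emits the distance classes in increasing order,
-- each sorted alphabetically (objective: alternative algorithm; it trades the queue
-- for repeated relaxation passes and is not claimed faster).

-- `graph.get(k, [])` — shared input lookup used by both ports.
def pvGet (graph : List (String × List String)) (k : String) : List String :=
  PySem.Dict.getD (PySem.Dict.ofList graph) k []

-- fuel bound for A's `while` loop: more than 1 (start) + total number of dep entries
-- levels can ever be processed, plus slack for the final empty-queue check.
def pvFuel (graph : List (String × List String)) : Nat :=
  3 + graph.length + (graph.map (fun p => p.2.length)).sum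

-- ===== PORT A =====
-- inner `for _ in range(level_size)` loop of A: pops `n` entries off the queue front;
-- an unvisited `current` is marked, appended to `lvl`, and its not-yet-visited deps are
-- appended at the back of the queue (the dep for-loop ported as a filter-append).
def pvLevelA (graph : List (String × List String)) :
    Nat → List String → PySem.Set String → List String →
    (List String × PySem.Set String × List String)
  | 0, queue, visited, lvl => (queue, visited, lvl)
  | n+1, queue, visited, lvl =>
    match queue with
    | [] => ([], visited, lvl)  -- unreachable: n+1 ≤ queue length at every call
    | current :: rest =>
      if current ∈ visited then
        pvLevelA graph n rest visited lvl
      else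
        let visited' := PySem.Set.add visited current
        pvLevelA graph n
          (rest ++ (pvGet graph current).filter (fun d => decide (d ∉ visited')))
          visited' (lvl ++ [current])

-- outer `while queue:` loop of A
def pvLoopA (graph : List (String × List String)) :
    Nat → List String → PySem.Set String → List String → List String
  | 0, _, _, load_order => load_order
  | fuel+1, queue, visited, load_order =>
    if queue = [] then load_order
    else
      let r := pvLevelA graph queue.length queue visited []
      pvLoopA graph fuel r.1 r.2.1 (load_order ++ PySem.List.sorted r.2.2 (fun x => x))

def bfs_load_order (graph : List (String × List String)) (start_package : String) : List String :=
  pvLoopA graph (pvFuel graph) [start_package] PySem.Set.empty []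

-- ===== PORT B =====
-- inner `for dep in deps:` loop of B: `if dep not in dist or dist[dep] > d1: dist[dep] = d1`
def pvRelaxDeps (d1 : Int) (deps : List String) (dist : PySem.Dict String Int) :
    PySem.Dict String Int :=
  deps.foldl (fun dd dep =>
    if dd.contains dep = false || decide (d1 < dd.getD dep 0) then dd.insert dep d1 else dd) dist

-- one pass of `for node, deps in graph.items(): if node in dist: …`
def pvPassB (g : PySem.Dict String (List String)) (dist : PySem.Dict String Int) :
    PySem.Dict String Int :=
  g.items.foldl (fun dd p =>
    if dd.contains p.1 then pvRelaxDeps (dd.getD p.1 0 + 1) p.2 dd else dd) dist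

-- `for _ in range(len(graph) + 1):`
def pvPassesB (g : PySem.Dict String (List String)) :
    Nat → PySem.Dict String Int → PySem.Dict String Int
  | 0, dist => dist
  | n+1, dist => pvPassesB g n (pvPassB g dist)

def bfs_load_order_alt (graph : List (String × List String)) (start_package : String) : List String :=
  let g := PySem.Dict.ofList graph
  let dist := pvPassesB g (g.size + 1) (PySem.Dict.ofList [(start_package, (0:Int))])
  let mx : Int :=
    match PySem.List.max? dist.values (fun v => v) with
    | some m => m
    | none => 0  -- unreachable: dist always contains start_package
  (PySem.List.pyRange 0 (mx + 1)).foldl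
    (fun order lvl =>
      order ++ PySem.List.sorted (dist.keys.filter (fun p => dist.get? p == some lvl)) (fun x => x)) []

-- ===== PRECONDITION & SPEC =====
def Spec_bfs_load_order (graph : List (String × List String)) (start_package : String) (out : List String) : Prop := out = bfs_load_order_alt graph start_package
instance (graph : List (String × List String)) (start_package : String) (out : List String) : Decidable (Spec_bfs_load_order graph start_package out) := by unfold Spec_bfs_load_order; infer_instance

-- ===== CLAIM (what is proved, stated in full; the proofs are below) =====
def Claim_equal_bfs_load_order : Prop := ∀ (graph : List (String × List String)) (start_package : String), Dom_bfs_load_order graph start_package → Spec_bfs_load_order graph start_package (bfs_load_order graph start_package)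

-- ===== LEMMAS AND PROOFS =====

-- ---------- shared ghost machinery: the BFS frontier sequence ----------

-- collect the not-yet-seen deps, marking seen at collection time
def pvDeps : List String → PySem.Set String → List String → (PySem.Set String × List String)
  | [], visited, nxt => (visited, nxt)
  | d :: ds, visited, nxt =>
    if d ∈ visited then pvDeps ds visited nxt
    else pvDeps ds (PySem.Set.add visited d) (nxt ++ [d])

-- expand a whole frontier
def pvExpand (graph : List (String × List String)) :
    List String → PySem.Set String → List String → (PySem.Set String × List String)
  | [], visited, nxt => (visited, nxt)
  | pkg :: rest, visited, nxt =>
    let p := pvDeps (pvGet graph pkg) visited nxt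
    pvExpand graph rest p.1 p.2

-- the frontier/visited sequence: (F n, W n)
def pvFW (graph : List (String × List String)) (start : String) :
    Nat → (List String × PySem.Set String)
  | 0 => ([start], PySem.Set.ofList [start])
  | n+1 =>
    let fw := pvFW graph start n
    let p := pvExpand graph fw.1 fw.2 []
    (p.2, p.1)

-- the frontier-emitting loop (intermediate between the two ports)
def pvFLoop (graph : List (String × List String)) :
    Nat → List String → PySem.Set String → List String → List String
  | 0, _, _, load_order => load_order
  | fuel+1, frontier, visited, load_order =>
    if frontier = [] then load_order
    else
      let p := pvExpand graph frontier visited []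
      pvFLoop graph fuel p.2 p.1 (load_order ++ PySem.List.sorted frontier (fun x => x))

-- ---------- A's level loop = pvExpand-style processing ----------

-- Functional specification of one whole level of A: processing the list `cs` of dequeued
-- entries with visited set `v` yields (visited', level_packages, appended next-queue).
def pvProc (graph : List (String × List String)) :
    List String → PySem.Set String → (PySem.Set String × List String × List String)
  | [], v => (v, [], [])
  | c :: cs, v =>
    if c ∈ v then pvProc graph cs v
    else
      let v1 := PySem.Set.add v c
      let r := pvProc graph cs v1
      (r.1, c :: r.2.1, (pvGet graph c).filter (fun d => decide (d ∉ v1)) ++ r.2.2)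

lemma pvLevelA_eq (graph : List (String × List String)) :
    ∀ (n : Nat) (q : List String) (v : PySem.Set String) (lvl : List String), n ≤ q.length →
    pvLevelA graph n q v lvl =
      (q.drop n ++ (pvProc graph (q.take n) v).2.2,
       (pvProc graph (q.take n) v).1,
       lvl ++ (pvProc graph (q.take n) v).2.1) := by
  intro n
  induction n with
  | zero => intro q v lvl _; simp [pvLevelA, pvProc]
  | succ n ih =>
    intro q v lvl hn
    match q with
    | [] => simp at hn
    | c :: rest =>
      simp only [List.length_cons, Nat.succ_le_succ_iff] at hn
      by_cases hc : c ∈ v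
      · simp only [pvLevelA, pvProc, if_pos hc, List.take_succ_cons, List.drop_succ_cons]
        exact ih rest v lvl hn
      · simp only [pvLevelA, pvProc, if_neg hc, List.take_succ_cons, List.drop_succ_cons]
        rw [ih _ _ _ (by simp [Nat.le_add_right_of_le hn])]
        rw [List.take_append_of_le_length hn, List.drop_append_of_le_length hn]
        simp [List.append_assoc]

lemma pvProc_mem_fst (graph : List (String × List String)) :
    ∀ (cs : List String) (v : PySem.Set String) (x : String),
    x ∈ (pvProc graph cs v).1 ↔ x ∈ v ∨ (x ∈ cs ∧ x ∉ v) := by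
  intro cs
  induction cs with
  | nil => intro v x; simp [pvProc]
  | cons c cs ih =>
    intro v x
    by_cases hc : c ∈ v
    · simp only [pvProc, if_pos hc]
      rw [ih]
      by_cases hx : x = c <;> simp [hx, hc]
    · simp only [pvProc, if_neg hc]
      rw [ih]
      simp only [PySem.Set.mem_add, List.mem_cons]
      by_cases hx : x = c <;> simp [hx, hc]

lemma pvProc_mem_lvl (graph : List (String × List String)) :
    ∀ (cs : List String) (v : PySem.Set String) (x : String),
    x ∈ (pvProc graph cs v).2.1 ↔ x ∈ cs ∧ x ∉ v := by
  intro cs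
  induction cs with
  | nil => intro v x; simp [pvProc]
  | cons c cs ih =>
    intro v x
    by_cases hc : c ∈ v
    · simp only [pvProc, if_pos hc]
      rw [ih]
      by_cases hx : x = c <;> simp [hx, hc]
    · simp only [pvProc, if_neg hc, List.mem_cons]
      rw [ih]
      simp only [PySem.Set.mem_add]
      by_cases hx : x = c <;> simp [hx, hc]

lemma pvProc_nodup_lvl (graph : List (String × List String)) :
    ∀ (cs : List String) (v : PySem.Set String), (pvProc graph cs v).2.1.Nodup := by
  intro cs
  induction cs with
  | nil => intro v; simp [pvProc]
  | cons c cs ih =>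
    intro v
    by_cases hc : c ∈ v
    · simp only [pvProc, if_pos hc]; exact ih v
    · simp only [pvProc, if_neg hc]
      refine List.nodup_cons.mpr ⟨?_, ih _⟩
      rw [pvProc_mem_lvl]
      simp [PySem.Set.mem_add]

lemma pvProc_next_sub (graph : List (String × List String)) :
    ∀ (cs : List String) (v : PySem.Set String) (x : String),
    x ∈ (pvProc graph cs v).2.2 → ∃ c ∈ (pvProc graph cs v).2.1, x ∈ pvGet graph c := by
  intro cs
  induction cs with
  | nil => intro v x h; simp [pvProc] at h
  | cons c cs ih =>
    intro v x h
    by_cases hc : c ∈ v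
    · simp only [pvProc, if_pos hc] at h ⊢; exact ih v x h
    · simp only [pvProc, if_neg hc, List.mem_append] at h ⊢
      rcases h with h | h
      · exact ⟨c, List.mem_cons_self .., (List.mem_filter.mp h).1⟩
      · obtain ⟨c', hc', hx⟩ := ih _ x h
        exact ⟨c', List.mem_cons_of_mem _ hc', hx⟩

lemma pvProc_next_mem (graph : List (String × List String)) :
    ∀ (cs : List String) (v : PySem.Set String) (c x : String),
    c ∈ (pvProc graph cs v).2.1 → x ∈ pvGet graph c → x ∉ (pvProc graph cs v).1 →
    x ∈ (pvProc graph cs v).2.2 := by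
  intro cs
  induction cs with
  | nil => intro v c x hc _ _; simp [pvProc] at hc
  | cons c0 cs ih =>
    intro v c x hc hx hnv
    by_cases hc0 : c0 ∈ v
    · simp only [pvProc, if_pos hc0] at hc hnv ⊢; exact ih v c x hc hx hnv
    · simp only [pvProc, if_neg hc0, List.mem_cons, List.mem_append] at hc hnv ⊢
      rcases hc with rfl | hc
      · left
        rw [List.mem_filter]
        refine ⟨hx, ?_⟩
        simp only [decide_eq_true_eq]
        intro hx1
        exact hnv ((pvProc_mem_fst graph cs _ x).mpr (Or.inl hx1))
      · right; exact ih _ c x hc hx hnv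

lemma pvProc_visited (graph : List (String × List String)) :
    ∀ (cs : List String) (v : PySem.Set String), (∀ x ∈ cs, x ∈ v) → pvProc graph cs v = (v, [], []) := by
  intro cs
  induction cs with
  | nil => intro v _; simp [pvProc]
  | cons c cs ih =>
    intro v h
    simp only [pvProc, if_pos (h c (List.mem_cons_self ..))]
    exact ih v (fun x hx => h x (List.mem_cons_of_mem _ hx))

-- ---------- pvDeps / pvExpand membership and nodup ----------

lemma pvDeps_mem_snd :
    ∀ (ds : List String) (w : PySem.Set String) (nxt : List String) (x : String),
    x ∈ (pvDeps ds w nxt).2 ↔ x ∈ nxt ∨ (x ∈ ds ∧ x ∉ w) := by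
  intro ds
  induction ds with
  | nil => intro w nxt x; simp [pvDeps]
  | cons d ds ih =>
    intro w nxt x
    by_cases hd : d ∈ w
    · simp only [pvDeps, if_pos hd]
      rw [ih]
      by_cases hx : x = d <;> simp [hx, hd]
    · simp only [pvDeps, if_neg hd]
      rw [ih]
      simp only [List.mem_append, PySem.Set.mem_add, List.mem_cons]
      by_cases hx : x = d <;> simp [hx, hd]

lemma pvDeps_mem_fst :
    ∀ (ds : List String) (w : PySem.Set String) (nxt : List String) (x : String),
    x ∈ (pvDeps ds w nxt).1 ↔ x ∈ w ∨ x ∈ ds := by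
  intro ds
  induction ds with
  | nil => intro w nxt x; simp [pvDeps]
  | cons d ds ih =>
    intro w nxt x
    by_cases hd : d ∈ w
    · simp only [pvDeps, if_pos hd]
      rw [ih]
      by_cases hx : x = d <;> simp [hx, hd]
    · simp only [pvDeps, if_neg hd]
      rw [ih]
      simp only [PySem.Set.mem_add, List.mem_cons]
      by_cases hx : x = d <;> simp [hx, hd]

lemma pvDeps_nodup :
    ∀ (ds : List String) (w : PySem.Set String) (nxt : List String),
    nxt.Nodup → (∀ x ∈ nxt, x ∈ w) →
    (pvDeps ds w nxt).2.Nodup ∧ ∀ x ∈ (pvDeps ds w nxt).2, x ∈ (pvDeps ds w nxt).1 := by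
  intro ds
  induction ds with
  | nil => intro w nxt h1 h2; simpa [pvDeps] using ⟨h1, h2⟩
  | cons d ds ih =>
    intro w nxt h1 h2
    by_cases hd : d ∈ w
    · simp only [pvDeps, if_pos hd]; exact ih w nxt h1 h2
    · simp only [pvDeps, if_neg hd]
      refine ih _ _ ?_ ?_
      · refine List.nodup_append.mpr ⟨h1, List.nodup_singleton d, ?_⟩
        intro x hx y hy
        rw [List.mem_singleton] at hy
        subst hy
        intro heq
        exact hd (heq ▸ h2 x hx)
      · intro x hx
        rw [List.mem_append, List.mem_singleton] at hx
        rcases hx with hx | rfl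
        · exact (PySem.Set.mem_add _ _ _).mpr (Or.inl (h2 x hx))
        · exact (PySem.Set.mem_add _ _ _).mpr (Or.inr rfl)

lemma pvExpand_mem_snd (graph : List (String × List String)) :
    ∀ (f : List String) (w : PySem.Set String) (nxt : List String) (x : String),
    x ∈ (pvExpand graph f w nxt).2 ↔ x ∈ nxt ∨ ((∃ p ∈ f, x ∈ pvGet graph p) ∧ x ∉ w) := by
  intro f
  induction f with
  | nil => intro w nxt x; simp [pvExpand]
  | cons pkg rest ih =>
    intro w nxt x
    simp only [pvExpand]
    rw [ih, pvDeps_mem_snd, pvDeps_mem_fst]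
    simp only [List.mem_cons]
    constructor
    · rintro ((h | ⟨h1, h2⟩) | ⟨⟨p, hp, hxp⟩, h2⟩)
      · exact Or.inl h
      · exact Or.inr ⟨⟨pkg, Or.inl rfl, h1⟩, h2⟩
      · exact Or.inr ⟨⟨p, Or.inr hp, hxp⟩, fun hw => h2 (Or.inl hw)⟩
    · rintro (h | ⟨⟨p, hp, hxp⟩, h2⟩)
      · exact Or.inl (Or.inl h)
      · by_cases hpk : x ∈ pvGet graph pkg
        · exact Or.inl (Or.inr ⟨hpk, h2⟩)
        · rcases hp with rfl | hp
          · exact absurd hxp hpk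
          · exact Or.inr ⟨⟨p, hp, hxp⟩, by tauto⟩

lemma pvExpand_mem_fst (graph : List (String × List String)) :
    ∀ (f : List String) (w : PySem.Set String) (nxt : List String) (x : String),
    x ∈ (pvExpand graph f w nxt).1 ↔ x ∈ w ∨ ∃ p ∈ f, x ∈ pvGet graph p := by
  intro f
  induction f with
  | nil => intro w nxt x; simp [pvExpand]
  | cons pkg rest ih =>
    intro w nxt x
    simp only [pvExpand]
    rw [ih, pvDeps_mem_fst]
    simp only [List.mem_cons]
    constructor
    · rintro ((h | h) | ⟨p, hp, hxp⟩)
      · exact Or.inl h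
      · exact Or.inr ⟨pkg, Or.inl rfl, h⟩
      · exact Or.inr ⟨p, Or.inr hp, hxp⟩
    · rintro (h | ⟨p, rfl | hp, hxp⟩)
      · exact Or.inl (Or.inl h)
      · exact Or.inl (Or.inr hxp)
      · exact Or.inr ⟨p, hp, hxp⟩

lemma pvExpand_nodup (graph : List (String × List String)) :
    ∀ (f : List String) (w : PySem.Set String) (nxt : List String),
    nxt.Nodup → (∀ x ∈ nxt, x ∈ w) → (pvExpand graph f w nxt).2.Nodup := by
  intro f
  induction f with
  | nil => intro w nxt h1 _; simpa [pvExpand] using h1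
  | cons pkg rest ih =>
    intro w nxt h1 h2
    simp only [pvExpand]
    obtain ⟨hn, hs⟩ := pvDeps_nodup (pvGet graph pkg) w nxt h1 h2
    exact ih _ _ hn hs

-- two duplicate-free lists with the same members have the same `sorted` image
lemma pvSorted_eq_of_mem_iff {L f : List String} (hL : L.Nodup) (hf : f.Nodup)
    (h : ∀ x, x ∈ L ↔ x ∈ f) :
    PySem.List.sorted L (fun x => x) = PySem.List.sorted f (fun x => x) := by
  refine PySem.List.eq_of_perm_of_pairwise_le_of_injective (fun x => x) (fun a b hab => hab)
    ?_ (PySem.List.sorted_pairwise L _) (PySem.List.sorted_pairwise f _)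
  exact ((PySem.List.sorted_perm L _ false).trans
    ((List.perm_ext_iff_of_nodup hL hf).mpr h)).trans (PySem.List.sorted_perm f _ false).symm

-- A's loop returns the accumulator unchanged once every queue entry is visited
lemma pvLoopA_visited (graph : List (String × List String)) :
    ∀ (fuel : Nat) (q : List String) (v : PySem.Set String) (acc : List String),
    (∀ x ∈ q, x ∈ v) → pvLoopA graph fuel q v acc = acc := by
  intro fuel
  induction fuel with
  | zero => intro q v acc _; rfl
  | succ fuel ih =>
    intro q v acc h
    by_cases hq : q = []
    · simp [pvLoopA, hq]
    · simp only [pvLoopA, if_neg hq]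
      rw [pvLevelA_eq graph q.length q v [] (le_refl _)]
      simp only [List.take_length, List.drop_length, pvProc_visited graph q v h,
        List.append_nil]
      rw [show PySem.List.sorted ([] : List String) (fun x => x) = [] from
        (PySem.List.sorted_eq_nil_iff _ _ _).mpr rfl]
      simp only [List.append_nil]
      exact ih [] v acc (by simp)

-- the loop invariant tying A's state (queue, visited) to the frontier state
def pvInv (q : List String) (v : PySem.Set String) (f : List String) (w : PySem.Set String) : Prop :=
  f.Nodup ∧ (∀ x, x ∈ f ↔ (x ∈ q ∧ x ∉ v)) ∧ (∀ x, x ∈ w ↔ (x ∈ v ∨ x ∈ f))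

lemma pvLoop_eq (graph : List (String × List String)) :
    ∀ (fuel : Nat) (q : List String) (v : PySem.Set String) (f : List String)
      (w : PySem.Set String) (acc : List String),
    pvInv q v f w → pvLoopA graph fuel q v acc = pvFLoop graph fuel f w acc := by
  intro fuel
  induction fuel with
  | zero => intro q v f w acc _; rfl
  | succ fuel ih =>
    intro q v f w acc hinv
    obtain ⟨hfnd, hf, hw⟩ := hinv
    by_cases hfe : f = []
    · subst hfe
      simp only [pvFLoop]
      exact pvLoopA_visited graph _ q v acc (fun x hx => by
        by_contra hxv
        exact (List.not_mem_nil (a := x)) ((hf x).mpr ⟨hx, hxv⟩))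
    · have hqe : q ≠ [] := by
        obtain ⟨x, hx⟩ := List.exists_mem_of_ne_nil f hfe
        exact List.ne_nil_of_mem ((hf x).mp hx).1
      simp only [pvLoopA, pvFLoop, if_neg hfe, if_neg hqe]
      rw [pvLevelA_eq graph q.length q v [] (le_refl _)]
      simp only [List.take_length, List.drop_length, List.nil_append]
      have hVw : ∀ x, x ∈ (pvProc graph q v).1 ↔ x ∈ w := by
        intro x
        rw [pvProc_mem_fst, hw, hf]
      have hlvl : PySem.List.sorted (pvProc graph q v).2.1 (fun x => x)
          = PySem.List.sorted f (fun x => x) := by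
        refine pvSorted_eq_of_mem_iff (pvProc_nodup_lvl graph q v) hfnd ?_
        intro x; rw [pvProc_mem_lvl, hf]
      rw [hlvl]
      refine ih _ _ _ _ _ ⟨?_, ?_, ?_⟩
      · exact pvExpand_nodup graph f w [] (List.nodup_nil) (by simp)
      · intro x
        rw [pvExpand_mem_snd]
        simp only [List.not_mem_nil, false_or]
        constructor
        · rintro ⟨⟨p, hp, hxp⟩, hxw⟩
          have hxV : x ∉ (pvProc graph q v).1 := fun hc => hxw ((hVw x).mp hc)
          refine ⟨pvProc_next_mem graph q v p x ?_ hxp hxV, hxV⟩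
          rw [pvProc_mem_lvl]; exact (hf p).mp hp
        · rintro ⟨hxN, hxV⟩
          obtain ⟨c, hc, hxc⟩ := pvProc_next_sub graph q v x hxN
          rw [pvProc_mem_lvl] at hc
          exact ⟨⟨c, (hf c).mpr hc, hxc⟩, fun hxw => hxV ((hVw x).mpr hxw)⟩
      · intro x
        rw [pvExpand_mem_fst, pvExpand_mem_snd, hVw x]
        simp only [List.not_mem_nil, false_or]
        tauto

-- ---------- frontier sequence facts ----------

lemma pvF0 (graph : List (String × List String)) (start : String) :
    (pvFW graph start 0).1 = [start] ∧ ∀ x, x ∈ (pvFW graph start 0).2 ↔ x = start := by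
  constructor
  · rfl
  · intro x; simp [pvFW, PySem.Set.ofList, PySem.Set.add, PySem.Set.empty]

lemma pvFW_succ_fst (graph : List (String × List String)) (start : String) (n : Nat) :
    (pvFW graph start (n+1)).1
      = (pvExpand graph (pvFW graph start n).1 (pvFW graph start n).2 []).2 := rfl

lemma pvFW_succ_snd (graph : List (String × List String)) (start : String) (n : Nat) :
    (pvFW graph start (n+1)).2
      = (pvExpand graph (pvFW graph start n).1 (pvFW graph start n).2 []).1 := rfl

lemma pvW_succ (graph : List (String × List String)) (start : String) (n : Nat) (x : String) :
    x ∈ (pvFW graph start (n+1)).2 ↔ x ∈ (pvFW graph start n).2 ∨ x ∈ (pvFW graph start (n+1)).1 := by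
  rw [pvFW_succ_fst, pvFW_succ_snd, pvExpand_mem_fst, pvExpand_mem_snd]
  simp only [List.not_mem_nil, false_or]
  tauto

lemma pvF_succ_mem (graph : List (String × List String)) (start : String) (n : Nat) (x : String) :
    x ∈ (pvFW graph start (n+1)).1 ↔
      (∃ p ∈ (pvFW graph start n).1, x ∈ pvGet graph p) ∧ x ∉ (pvFW graph start n).2 := by
  rw [pvFW_succ_fst, pvExpand_mem_snd]
  simp only [List.not_mem_nil, false_or]

lemma pvF_nodup (graph : List (String × List String)) (start : String) (n : Nat) :
    (pvFW graph start n).1.Nodup := by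
  cases n with
  | zero => exact List.nodup_singleton start
  | succ n =>
    rw [pvFW_succ_fst]
    exact pvExpand_nodup graph _ _ [] List.nodup_nil (by simp)

lemma pvF_subset_W (graph : List (String × List String)) (start : String) (n : Nat) (x : String) :
    x ∈ (pvFW graph start n).1 → x ∈ (pvFW graph start n).2 := by
  cases n with
  | zero =>
    intro h
    rw [(pvF0 graph start).1, List.mem_singleton] at h
    exact ((pvF0 graph start).2 x).mpr h
  | succ n =>
    intro h
    rw [pvW_succ]
    exact Or.inr h

lemma pvW_mono (graph : List (String × List String)) (start : String) {m k : Nat} (h : m ≤ k)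
    (x : String) : x ∈ (pvFW graph start m).2 → x ∈ (pvFW graph start k).2 := by
  induction k with
  | zero => intro hx; rwa [Nat.le_zero.mp h] at hx
  | succ k ih =>
    intro hx
    rcases Nat.le_succ_iff.mp h with h' | rfl
    · rw [pvW_succ]; exact Or.inl (ih h' hx)
    · exact hx

lemma pvW_mem (graph : List (String × List String)) (start : String) (n : Nat) (x : String) :
    x ∈ (pvFW graph start n).2 ↔ ∃ i ≤ n, x ∈ (pvFW graph start i).1 := by
  induction n with
  | zero =>
    rw [(pvF0 graph start).2 x]
    constructor
    · intro hx
      refine ⟨0, le_refl _, ?_⟩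
      rw [(pvF0 graph start).1, List.mem_singleton]
      exact hx
    · rintro ⟨i, hi, hx⟩
      rw [Nat.le_zero.mp hi] at hx
      rw [(pvF0 graph start).1, List.mem_singleton] at hx
      exact hx
  | succ n ih =>
    rw [pvW_succ, ih]
    constructor
    · rintro (⟨i, hi, hx⟩ | hx)
      · exact ⟨i, Nat.le_succ_of_le hi, hx⟩
      · exact ⟨n+1, le_refl _, hx⟩
    · rintro ⟨i, hi, hx⟩
      rcases Nat.le_succ_iff.mp hi with h' | rfl
      · exact Or.inl ⟨i, h', hx⟩
      · exact Or.inr hx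

lemma pvF_inj_aux (graph : List (String × List String)) (start : String) {m n : Nat} {x : String}
    (hmn : m < n) (h1 : x ∈ (pvFW graph start m).1) (h2 : x ∈ (pvFW graph start n).1) : False := by
  obtain ⟨n', rfl⟩ : ∃ n', n = n' + 1 := ⟨n - 1, by omega⟩
  have hW : x ∈ (pvFW graph start n').2 :=
    pvW_mono graph start (by omega) x (pvF_subset_W graph start m x h1)
  exact ((pvF_succ_mem graph start n' x).mp h2).2 hW

lemma pvF_inj (graph : List (String × List String)) (start : String) {m n : Nat} {x : String} :
    x ∈ (pvFW graph start m).1 → x ∈ (pvFW graph start n).1 → m = n := by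
  intro h1 h2
  rcases Nat.lt_trichotomy m n with h | h | h
  · exact absurd (pvF_inj_aux graph start h h1 h2) (not_false)
  · exact h
  · exact absurd (pvF_inj_aux graph start h h2 h1) (not_false)

lemma pvF_empty_le (graph : List (String × List String)) (start : String) {m n : Nat}
    (h : m ≤ n) (he : (pvFW graph start m).1 = []) : (pvFW graph start n).1 = [] := by
  induction n with
  | zero => rwa [Nat.le_zero.mp h] at he
  | succ n ih =>
    rcases Nat.le_succ_iff.mp h with h' | rfl
    · rw [pvFW_succ_fst, ih h']
      rfl
    · exact he

lemma pvF_adj (graph : List (String × List String)) (start : String) {m : Nat} {p x : String}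
    (hp : p ∈ (pvFW graph start m).1) (hx : x ∈ pvGet graph p) :
    ∃ n ≤ m + 1, x ∈ (pvFW graph start n).1 := by
  by_cases hW : x ∈ (pvFW graph start m).2
  · obtain ⟨i, hi, hxi⟩ := (pvW_mem graph start m x).mp hW
    exact ⟨i, by omega, hxi⟩
  · exact ⟨m+1, le_refl _, (pvF_succ_mem graph start m x).mpr ⟨⟨p, hp, hx⟩, hW⟩⟩

-- a nonempty frontier at depth m yields m distinct keys of the graph dict
lemma pvF_keylist (graph : List (String × List String)) (start : String) :
    ∀ (m : Nat), (pvFW graph start m).1 ≠ [] →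
    ∃ l : List String, l.Nodup ∧ l.length = m ∧
      (∀ p ∈ l, p ∈ (PySem.Dict.ofList graph).keys) ∧
      (∀ p ∈ l, ∃ i < m, p ∈ (pvFW graph start i).1) := by
  intro m
  induction m with
  | zero => intro _; exact ⟨[], List.nodup_nil, rfl, by simp, by simp⟩
  | succ m ih =>
    intro h
    obtain ⟨x, hx⟩ := List.exists_mem_of_ne_nil _ h
    obtain ⟨⟨p, hpF, hxadj⟩, -⟩ := (pvF_succ_mem graph start m x).mp hx
    obtain ⟨l, hnd, hlen, hkeys, hdepth⟩ := ih (List.ne_nil_of_mem hpF)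
    have hpnotl : p ∉ l := by
      intro hpl
      obtain ⟨i, hi, hpi⟩ := hdepth p hpl
      exact absurd (pvF_inj graph start hpi hpF) (by omega)
    have hpkey : p ∈ (PySem.Dict.ofList graph).keys := by
      rw [← PySem.Dict.contains_iff_mem_keys]
      by_contra hc
      have : pvGet graph p = [] :=
        PySem.Dict.getD_of_not_contains _ _ (Bool.not_eq_true _ ▸ hc)
      rw [this] at hxadj
      exact List.not_mem_nil hxadj
    refine ⟨p :: l, List.nodup_cons.mpr ⟨hpnotl, hnd⟩, by simp [hlen], ?_, ?_⟩
    · intro q hq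
      rcases List.mem_cons.mp hq with rfl | hq
      · exact hpkey
      · exact hkeys q hq
    · intro q hq
      rcases List.mem_cons.mp hq with rfl | hq
      · exact ⟨m, by omega, hpF⟩
      · obtain ⟨i, hi, hqi⟩ := hdepth q hq
        exact ⟨i, by omega, hqi⟩

lemma pvF_keybound (graph : List (String × List String)) (start : String) (m : Nat)
    (h : (pvFW graph start m).1 ≠ []) : m ≤ (PySem.Dict.ofList graph).size := by
  obtain ⟨l, hnd, hlen, hkeys, -⟩ := pvF_keylist graph start m h
  have h1 : l.length ≤ (PySem.Dict.ofList graph).keys.length :=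
    (List.subperm_of_subset hnd (fun x hx => hkeys x hx)).length_le
  have h2 : (PySem.Dict.ofList graph).keys.length = (PySem.Dict.ofList graph).size := by
    simp [PySem.Dict.keys, PySem.Dict.size]
  omega

lemma pvUpdate_size_le {κ ν : Type} [BEq κ] :
    ∀ (ps : List (κ × ν)) (d : PySem.Dict κ ν), (d.update ps).size ≤ d.size + ps.length := by
  intro ps
  induction ps with
  | nil => intro d; simp [PySem.Dict.update]
  | cons p ps ih =>
    intro d
    have h1 : (d.update (p :: ps)) = ((d.insert p.1 p.2).update ps) := by
      simp [PySem.Dict.update]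
    rw [h1]
    have h2 := ih (d.insert p.1 p.2)
    have h3 := PySem.Dict.size_insert d p.1 p.2
    by_cases hc : d.contains p.1 = true <;> simp [hc] at h3 <;> simp [List.length_cons] <;> omega

lemma pvSize_ofList_le (graph : List (String × List String)) :
    (PySem.Dict.ofList graph).size ≤ graph.length := by
  have h1 : (PySem.Dict.ofList graph) = (PySem.Dict.empty.update graph) := by
    simp [PySem.Dict.ofList]
  rw [h1]
  have := pvUpdate_size_le graph (PySem.Dict.empty (κ := String) (ν := List String))
  simpa [PySem.Dict.size_empty] using this

-- the frontier loop emits the sorted frontiers in depth order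
lemma pvFLoop_flatten (graph : List (String × List String)) (start : String) :
    ∀ (d n fuel : Nat) (acc : List String), (pvFW graph start (n + d)).1 = [] → d ≤ fuel →
    pvFLoop graph fuel (pvFW graph start n).1 (pvFW graph start n).2 acc =
      acc ++ ((List.range d).map
        (fun i => PySem.List.sorted (pvFW graph start (n + i)).1 (fun x => x))).flatten := by
  intro d
  induction d with
  | zero =>
    intro n fuel acc he _
    rw [Nat.add_zero] at he
    cases fuel <;> simp [pvFLoop, he]
  | succ d ih =>
    intro n fuel acc he hfuel
    obtain ⟨fuel', rfl⟩ : ∃ f', fuel = f' + 1 := ⟨fuel - 1, by omega⟩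
    by_cases hFn : (pvFW graph start n).1 = []
    · have hall : ∀ i, (pvFW graph start (n + i)).1 = [] :=
        fun i => pvF_empty_le graph start (Nat.le_add_right n i) hFn
      have hflat : ((List.range (d+1)).map
          (fun i => PySem.List.sorted (pvFW graph start (n + i)).1 (fun x => x))).flatten = [] := by
        rw [List.flatten_eq_nil_iff]
        intro l hl
        obtain ⟨i, -, rfl⟩ := List.mem_map.mp hl
        rw [hall i]
        exact (PySem.List.sorted_eq_nil_iff _ _ _).mpr rfl
      rw [hflat, List.append_nil]
      simp [pvFLoop, hFn]
    · simp only [pvFLoop, if_neg hFn]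
      have hnext : pvFLoop graph fuel'
          (pvExpand graph (pvFW graph start n).1 (pvFW graph start n).2 []).2
          (pvExpand graph (pvFW graph start n).1 (pvFW graph start n).2 []).1
          (acc ++ PySem.List.sorted (pvFW graph start n).1 (fun x => x)) =
          pvFLoop graph fuel' (pvFW graph start (n+1)).1 (pvFW graph start (n+1)).2
          (acc ++ PySem.List.sorted (pvFW graph start n).1 (fun x => x)) := by
        rw [pvFW_succ_fst, pvFW_succ_snd]
      rw [hnext, ih (n+1) fuel' _ (by rw [show n + 1 + d = n + (d+1) by omega]; exact he) (by omega)]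
      rw [List.range_succ_eq_map]
      simp only [List.map_cons, List.map_map, List.flatten_cons, Nat.add_zero]
      rw [List.append_assoc]
      congr 2
      congr 1
      apply List.map_congr_left
      intro i _
      have hni : n + 1 + i = n + Nat.succ i := by omega
      simp only [Function.comp_apply, hni]

-- ---------- B's relaxation: invariant, monotonicity, progress ----------

def pvInvB (graph : List (String × List String)) (start : String)
    (dd : PySem.Dict String Int) : Prop :=
  dd.keys.Nodup ∧ dd.get? start = some 0 ∧
    ∀ x v, dd.get? x = some v → ∃ n : Nat, x ∈ (pvFW graph start n).1 ∧ (n : Int) ≤ v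

-- with the invariant, any stored value at a frontier node of known depth is bounded below
lemma pvLevel_lower (graph : List (String × List String)) (start : String)
    {dd : PySem.Dict String Int} (hinv : pvInvB graph start dd) {x : String} {v : Int} {m : Nat}
    (hx : dd.get? x = some v) (hm : x ∈ (pvFW graph start m).1) : (m : Int) ≤ v := by
  obtain ⟨n, hF, hn⟩ := hinv.2.2 x v hx
  rwa [pvF_inj graph start hF hm] at hn

-- a single relaxation step `if dep not in dist or dist[dep] > d1: dist[dep] = d1`
def pvRelax1 (d1 : Int) (dd : PySem.Dict String Int) (dep : String) : PySem.Dict String Int :=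
  if dd.contains dep = false || decide (d1 < dd.getD dep 0) then dd.insert dep d1 else dd

lemma pvRelaxDeps_eq (d1 : Int) (deps : List String) (dd : PySem.Dict String Int) :
    pvRelaxDeps d1 deps dd = deps.foldl (pvRelax1 d1) dd := rfl

lemma pvRelax1_mono (d1 : Int) (dd : PySem.Dict String Int) (dep : String)
    {x : String} {v : Int} (h : dd.get? x = some v) :
    ∃ v', (pvRelax1 d1 dd dep).get? x = some v' ∧ v' ≤ v ∧ (v' = v ∨ v' = d1) := by
  unfold pvRelax1
  split_ifs with hc
  · rw [PySem.Dict.get?_insert]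
    by_cases hx : x = dep
    · subst hx
      have hcont : dd.contains x = true := by
        rw [PySem.Dict.contains_eq_isSome_get?, h]; rfl
      have hlt : d1 < dd.getD x 0 := by
        rcases Bool.or_eq_true_iff.mp hc with hc1 | hc1
        · rw [hcont] at hc1; cases hc1
        · exact of_decide_eq_true hc1
      rw [PySem.Dict.getD_eq_get?_getD, h] at hlt
      exact ⟨d1, by simp, le_of_lt hlt, Or.inr rfl⟩
    · exact ⟨v, by simp [hx, h], le_refl _, Or.inl rfl⟩
  · exact ⟨v, h, le_refl _, Or.inl rfl⟩

lemma pvRelax1_new (d1 : Int) (dd : PySem.Dict String Int) (dep : String)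
    {x : String} {v : Int} (h : (pvRelax1 d1 dd dep).get? x = some v) :
    dd.get? x = some v ∨ (x = dep ∧ v = d1) := by
  unfold pvRelax1 at h
  split_ifs at h with hc
  · rw [PySem.Dict.get?_insert] at h
    by_cases hx : x = dep
    · rw [if_pos hx] at h
      exact Or.inr ⟨hx, (Option.some_inj.mp h).symm⟩
    · rw [if_neg hx] at h
      exact Or.inl h
  · exact Or.inl h

lemma pvRelax1_self_le (d1 : Int) (dd : PySem.Dict String Int) (dep : String) :
    ∃ v', (pvRelax1 d1 dd dep).get? dep = some v' ∧ v' ≤ d1 := by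
  unfold pvRelax1
  split_ifs with hc
  · exact ⟨d1, PySem.Dict.get?_insert_self dd dep d1, le_refl _⟩
  · rw [Bool.or_eq_true_iff, not_or] at hc
    obtain ⟨hc1, hc2⟩ := hc
    have hcont : dd.contains dep = true := by
      cases hcc : dd.contains dep
      · exact absurd rfl (hcc ▸ hc1)
      · rfl
    rw [PySem.Dict.contains_eq_isSome_get?] at hcont
    obtain ⟨w, hw⟩ := Option.isSome_iff_exists.mp hcont
    have hle : ¬ d1 < dd.getD dep 0 := fun hlt => hc2 (decide_eq_true hlt)
    rw [PySem.Dict.getD_eq_get?_getD, hw] at hle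
    exact ⟨w, hw, le_of_not_gt hle⟩

lemma pvRelax1_nodup (d1 : Int) (dd : PySem.Dict String Int) (dep : String)
    (h : dd.keys.Nodup) : (pvRelax1 d1 dd dep).keys.Nodup := by
  unfold pvRelax1
  split_ifs
  · exact PySem.Dict.nodup_keys_insert dd dep d1 h
  · exact h

lemma pvRelaxDeps_mono (d1 : Int) (deps : List String) (dd : PySem.Dict String Int)
    {x : String} {v : Int} (h : dd.get? x = some v) :
    ∃ v', (pvRelaxDeps d1 deps dd).get? x = some v' ∧ v' ≤ v ∧ (v' = v ∨ v' = d1) := by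
  rw [pvRelaxDeps_eq]
  induction deps generalizing dd v with
  | nil => exact ⟨v, h, le_refl _, Or.inl rfl⟩
  | cons d ds ih =>
    rw [List.foldl_cons]
    obtain ⟨v1, h1, hle1, hor1⟩ := pvRelax1_mono d1 dd d h
    obtain ⟨v', h', hle', hor'⟩ := ih _ h1
    refine ⟨v', h', le_trans hle' hle1, ?_⟩
    rcases hor' with rfl | rfl
    · exact hor1
    · exact Or.inr rfl

lemma pvRelaxDeps_new (d1 : Int) (deps : List String) (dd : PySem.Dict String Int)
    {x : String} {v : Int} (h : (pvRelaxDeps d1 deps dd).get? x = some v) :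
    dd.get? x = some v ∨ (x ∈ deps ∧ v = d1) := by
  rw [pvRelaxDeps_eq] at h
  induction deps generalizing dd with
  | nil => exact Or.inl h
  | cons d ds ih =>
    rw [List.foldl_cons] at h
    rcases ih _ h with h1 | ⟨hmem, rfl⟩
    · rcases pvRelax1_new d1 dd d h1 with h2 | ⟨rfl, rfl⟩
      · exact Or.inl h2
      · exact Or.inr ⟨List.mem_cons_self .., rfl⟩
    · exact Or.inr ⟨List.mem_cons_of_mem _ hmem, rfl⟩

lemma pvRelaxDeps_le (d1 : Int) (deps : List String) (dd : PySem.Dict String Int)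
    {x : String} (h : x ∈ deps) :
    ∃ v', (pvRelaxDeps d1 deps dd).get? x = some v' ∧ v' ≤ d1 := by
  rw [pvRelaxDeps_eq]
  induction deps generalizing dd with
  | nil => cases h
  | cons d ds ih =>
    rw [List.foldl_cons]
    rcases List.mem_cons.mp h with rfl | hmem
    · obtain ⟨v1, h1, hle1⟩ := pvRelax1_self_le d1 dd x
      obtain ⟨v', h', hle', hor'⟩ := by
        have := pvRelaxDeps_mono d1 ds (pvRelax1 d1 dd x) h1
        rwa [pvRelaxDeps_eq] at this
      refine ⟨v', h', ?_⟩
      rcases hor' with rfl | rfl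
      · exact le_trans hle' hle1
      · exact le_refl _
    · exact ih _ hmem

lemma pvRelaxDeps_nodup (d1 : Int) (deps : List String) (dd : PySem.Dict String Int)
    (h : dd.keys.Nodup) : (pvRelaxDeps d1 deps dd).keys.Nodup := by
  rw [pvRelaxDeps_eq]
  induction deps generalizing dd with
  | nil => exact h
  | cons d ds ih =>
    rw [List.foldl_cons]
    exact ih _ (pvRelax1_nodup d1 dd d h)

-- the body of one pass over one item
def pvStepB (dd : PySem.Dict String Int) (p : String × List String) : PySem.Dict String Int :=
  if dd.contains p.1 then pvRelaxDeps (dd.getD p.1 0 + 1) p.2 dd else dd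

lemma pvPassB_eq_foldl (g : PySem.Dict String (List String)) (dist : PySem.Dict String Int) :
    pvPassB g dist = g.items.foldl pvStepB dist := rfl

lemma pvStepB_mono (dd : PySem.Dict String Int) (p : String × List String)
    {x : String} {v : Int} (h : dd.get? x = some v) :
    ∃ v', (pvStepB dd p).get? x = some v' ∧ v' ≤ v := by
  unfold pvStepB
  split_ifs
  · obtain ⟨v', h', hle, -⟩ := pvRelaxDeps_mono _ p.2 dd h
    exact ⟨v', h', hle⟩
  · exact ⟨v, h, le_refl _⟩

lemma pvStepB_inv (graph : List (String × List String)) (start : String)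
    {dd : PySem.Dict String Int} (hinv : pvInvB graph start dd) {p : String × List String}
    (hp : p ∈ (PySem.Dict.ofList graph).items) : pvInvB graph start (pvStepB dd p) := by
  obtain ⟨hnd, hstart, hlev⟩ := hinv
  unfold pvStepB
  split_ifs with hc
  · -- p.1 is in dist with some value vn ≥ its depth
    have hsome : (dd.get? p.1).isSome := by
      rw [← PySem.Dict.contains_eq_isSome_get?]; exact hc
    obtain ⟨vn, hvn⟩ := Option.isSome_iff_exists.mp hsome
    have hgetD : dd.getD p.1 0 = vn := by rw [PySem.Dict.getD_eq_get?_getD, hvn]; rfl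
    obtain ⟨mp, hpF, hmp⟩ := hlev p.1 vn hvn
    have hdeps : pvGet graph p.1 = p.2 := by
      unfold pvGet
      exact PySem.Dict.getD_of_mem_items _ (by rw [Prod.mk.eta]; exact hp)
        (PySem.Dict.nodup_keys_ofList graph) []
    rw [hgetD]
    refine ⟨pvRelaxDeps_nodup _ _ _ hnd, ?_, ?_⟩
    · obtain ⟨v', h', hle, hor⟩ := pvRelaxDeps_mono (vn + 1) p.2 dd hstart
      have hvn0 : (0:Int) ≤ vn := le_trans (by positivity) hmp
      rcases hor with rfl | rfl
      · exact h'
      · omega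
    · intro x v hx
      rcases pvRelaxDeps_new _ _ _ hx with h1 | ⟨hxdeps, rfl⟩
      · exact hlev x v h1
      · rw [← hdeps] at hxdeps
        obtain ⟨n, hn, hxF⟩ := pvF_adj graph start hpF hxdeps
        refine ⟨n, hxF, ?_⟩
        have : (n : Int) ≤ (mp : Int) + 1 := by exact_mod_cast Nat.cast_le.mpr hn
        omega
  · exact ⟨hnd, hstart, hlev⟩

lemma pvFoldB_inv (graph : List (String × List String)) (start : String)
    (l : List (String × List String)) (hl : ∀ e ∈ l, e ∈ (PySem.Dict.ofList graph).items) :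
    ∀ (dd : PySem.Dict String Int), pvInvB graph start dd →
    pvInvB graph start (l.foldl pvStepB dd) := by
  induction l with
  | nil => intro dd h; exact h
  | cons e l ih =>
    intro dd h
    rw [List.foldl_cons]
    exact ih (fun e' he' => hl e' (List.mem_cons_of_mem _ he')) _
      (pvStepB_inv graph start h (hl e (List.mem_cons_self ..)))

lemma pvFoldB_mono (l : List (String × List String)) :
    ∀ (dd : PySem.Dict String Int) (x : String) (v : Int), dd.get? x = some v →
    ∃ v', (l.foldl pvStepB dd).get? x = some v' ∧ v' ≤ v := by
  induction l with
  | nil => intro dd x v h; exact ⟨v, h, le_refl _⟩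
  | cons e l ih =>
    intro dd x v h
    rw [List.foldl_cons]
    obtain ⟨v1, h1, hle1⟩ := pvStepB_mono dd e h
    obtain ⟨v', h', hle'⟩ := ih _ x v1 h1
    exact ⟨v', h', le_trans hle' hle1⟩

lemma pvFoldB_exact (graph : List (String × List String)) (start : String)
    (l : List (String × List String)) (hl : ∀ e ∈ l, e ∈ (PySem.Dict.ofList graph).items) :
    ∀ (dd : PySem.Dict String Int) (x : String) (m : Nat), pvInvB graph start dd →
    x ∈ (pvFW graph start m).1 → dd.get? x = some (m : Int) →
    (l.foldl pvStepB dd).get? x = some (m : Int) := by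
  induction l with
  | nil => intro dd x m _ _ h; exact h
  | cons e l ih =>
    intro dd x m hinv hxF h
    rw [List.foldl_cons]
    have hinv1 : pvInvB graph start (pvStepB dd e) :=
      pvStepB_inv graph start hinv (hl e (List.mem_cons_self ..))
    obtain ⟨v1, h1, hle1⟩ := pvStepB_mono dd e h
    have hlow := pvLevel_lower graph start hinv1 h1 hxF
    have hv1 : v1 = (m : Int) := le_antisymm hle1 hlow
    subst hv1
    exact ih (fun e' he' => hl e' (List.mem_cons_of_mem _ he')) _ x m hinv1 hxF h1

lemma pvPassB_progress (graph : List (String × List String)) (start : String) (k : Nat)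
    {dd : PySem.Dict String Int} (hinv : pvInvB graph start dd)
    (hex : ∀ m ≤ k, ∀ x ∈ (pvFW graph start m).1, dd.get? x = some (m : Int)) :
    pvInvB graph start (pvPassB (PySem.Dict.ofList graph) dd) ∧
    ∀ m ≤ k + 1, ∀ x ∈ (pvFW graph start m).1,
      (pvPassB (PySem.Dict.ofList graph) dd).get? x = some (m : Int) := by
  constructor
  · rw [pvPassB_eq_foldl]
    exact pvFoldB_inv graph start _ (fun e he => he) dd hinv
  · intro m hm x hxF
    rcases Nat.le_succ_iff.mp hm with hm' | rfl
    · rw [pvPassB_eq_foldl]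
      exact pvFoldB_exact graph start _ (fun e he => he) dd x m hinv hxF (hex m hm' x hxF)
    · -- x is at depth k+1: some p in the depth-k frontier lists x among its deps
      obtain ⟨⟨p, hpF, hxadj⟩, -⟩ := (pvF_succ_mem graph start k x).mp hxF
      have hpcont : (PySem.Dict.ofList graph).contains p = true := by
        by_contra hc
        have hnil : pvGet graph p = [] :=
          PySem.Dict.getD_of_not_contains _ [] (Bool.not_eq_true _ ▸ hc)
        rw [hnil] at hxadj
        exact List.not_mem_nil hxadj
      have hsome2 : ((PySem.Dict.ofList graph).get? p).isSome := by
        rw [← PySem.Dict.contains_eq_isSome_get?]; exact hpcont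
      obtain ⟨deps, hdeps⟩ := Option.isSome_iff_exists.mp hsome2
      have hmemitems : (p, deps) ∈ (PySem.Dict.ofList graph).items :=
        (PySem.Dict.get?_eq_some_iff_mem_items _ p deps (PySem.Dict.nodup_keys_ofList graph)).mp hdeps
      have hpvget : pvGet graph p = deps :=
        PySem.Dict.getD_of_mem_items _ hmemitems (PySem.Dict.nodup_keys_ofList graph) []
      obtain ⟨l1, l2, hitems⟩ := List.append_of_mem hmemitems
      have hsub1 : ∀ e ∈ l1, e ∈ (PySem.Dict.ofList graph).items := by
        intro e he; rw [hitems]; exact List.mem_append_left _ he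
      have hsub2 : ∀ e ∈ l2, e ∈ (PySem.Dict.ofList graph).items := by
        intro e he; rw [hitems]
        exact List.mem_append_right _ (List.mem_cons_of_mem _ he)
      rw [pvPassB_eq_foldl, hitems, List.foldl_append, List.foldl_cons]
      have hinv1 : pvInvB graph start (List.foldl pvStepB dd l1) :=
        pvFoldB_inv graph start l1 hsub1 dd hinv
      have hp1 : (List.foldl pvStepB dd l1).get? p = some (k : Int) :=
        pvFoldB_exact graph start l1 hsub1 dd p k hinv hpF (hex k (le_refl _) p hpF)
      have hcont1 : (List.foldl pvStepB dd l1).contains p = true := by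
        rw [PySem.Dict.contains_eq_isSome_get?, hp1]; rfl
      have hgetD1 : (List.foldl pvStepB dd l1).getD p 0 = (k : Int) := by
        rw [PySem.Dict.getD_eq_get?_getD, hp1]; rfl
      have hstep : pvStepB (List.foldl pvStepB dd l1) (p, deps)
          = pvRelaxDeps ((k : Int) + 1) deps (List.foldl pvStepB dd l1) := by
        simp [pvStepB, hcont1, hgetD1]
      rw [hstep]
      have hxdeps : x ∈ deps := hpvget ▸ hxadj
      obtain ⟨v1, hv1, hv1le⟩ := pvRelaxDeps_le _ deps _ hxdeps
      obtain ⟨v2, hv2, hv2le⟩ := pvFoldB_mono l2 _ x v1 hv1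
      have hinv2 : pvInvB graph start
          (List.foldl pvStepB (pvRelaxDeps ((k : Int) + 1) deps (List.foldl pvStepB dd l1)) l2) := by
        refine pvFoldB_inv graph start l2 hsub2 _ ?_
        rw [← hstep]
        exact pvStepB_inv graph start hinv1 hmemitems
      have hlow := pvLevel_lower graph start hinv2 hv2 hxF
      have hv2eq : v2 = ((k + 1 : Nat) : Int) := by
        push_cast at hlow ⊢
        omega
      rw [hv2, hv2eq]

lemma pvInit_get? (start : String) (x : String) :
    (PySem.Dict.ofList [(start, (0:Int))]).get? x = if start = x then some 0 else none := by
  simp [PySem.Dict.ofList, PySem.Dict.update, PySem.Dict.get?, PySem.Dict.empty,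
    PySem.Dict.insert, PySem.Dict.contains]

lemma pvPassesB_progress_gen (graph : List (String × List String)) (start : String) :
    ∀ (j k : Nat) (dd : PySem.Dict String Int), pvInvB graph start dd →
    (∀ m ≤ k, ∀ x ∈ (pvFW graph start m).1, dd.get? x = some (m : Int)) →
    pvInvB graph start (pvPassesB (PySem.Dict.ofList graph) j dd) ∧
    ∀ m ≤ k + j, ∀ x ∈ (pvFW graph start m).1,
      (pvPassesB (PySem.Dict.ofList graph) j dd).get? x = some (m : Int) := by
  intro j
  induction j with
  | zero =>
    intro k dd hinv hex
    exact ⟨hinv, fun m hm => hex m (by omega)⟩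
  | succ j ih =>
    intro k dd hinv hex
    obtain ⟨hinv', hex'⟩ := pvPassB_progress graph start k hinv hex
    obtain ⟨hinv'', hex''⟩ := ih (k+1) (pvPassB (PySem.Dict.ofList graph) dd) hinv' hex'
    refine ⟨hinv'', ?_⟩
    intro m hm x hxF
    exact hex'' m (by omega) x hxF

lemma pvPasses_progress (graph : List (String × List String)) (start : String) :
    ∀ (j : Nat),
    pvInvB graph start (pvPassesB (PySem.Dict.ofList graph) j (PySem.Dict.ofList [(start, (0:Int))])) ∧
    ∀ m ≤ j, ∀ x ∈ (pvFW graph start m).1,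
      (pvPassesB (PySem.Dict.ofList graph) j (PySem.Dict.ofList [(start, (0:Int))])).get? x
        = some (m : Int) := by
  intro j
  have hinv0 : pvInvB graph start (PySem.Dict.ofList [(start, (0:Int))]) := by
    refine ⟨PySem.Dict.nodup_keys_ofList _, ?_, ?_⟩
    · rw [pvInit_get?, if_pos rfl]
    · intro x v h
      rw [pvInit_get?] at h
      split_ifs at h with hs
      · have hv : v = 0 := (Option.some_inj.mp h).symm
        refine ⟨0, ?_, ?_⟩
        · rw [(pvF0 graph start).1, List.mem_singleton]
          exact hs.symm
        · rw [hv]; simp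
  have hex0 : ∀ m ≤ 0, ∀ x ∈ (pvFW graph start m).1,
      (PySem.Dict.ofList [(start, (0:Int))]).get? x = some (m : Int) := by
    intro m hm x hxF
    rw [Nat.le_zero.mp hm] at hxF ⊢
    rw [(pvF0 graph start).1, List.mem_singleton] at hxF
    rw [pvInit_get?, if_pos hxF.symm]
    rfl
  have := pvPassesB_progress_gen graph start j 0 _ hinv0 hex0
  exact ⟨this.1, fun m hm => this.2 m (by omega)⟩

-- the final distance map reads back exactly the frontier depths
lemma pvDist_char (graph : List (String × List String)) (start : String) (x : String) (v : Int) :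
    (pvPassesB (PySem.Dict.ofList graph) ((PySem.Dict.ofList graph).size + 1)
        (PySem.Dict.ofList [(start, (0:Int))])).get? x = some v ↔
      ∃ n : Nat, v = (n : Int) ∧ x ∈ (pvFW graph start n).1 := by
  obtain ⟨hinv, hex⟩ := pvPasses_progress graph start ((PySem.Dict.ofList graph).size + 1)
  constructor
  · intro h
    obtain ⟨n, hxF, hn⟩ := hinv.2.2 x v h
    have hb : n ≤ (PySem.Dict.ofList graph).size :=
      pvF_keybound graph start n (List.ne_nil_of_mem hxF)
    have := hex n (by omega) x hxF
    rw [this] at h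
    exact ⟨n, (Option.some_inj.mp h).symm, hxF⟩
  · rintro ⟨n, rfl, hxF⟩
    have hb : n ≤ (PySem.Dict.ofList graph).size :=
      pvF_keybound graph start n (List.ne_nil_of_mem hxF)
    exact hex n (by omega) x hxF

-- the maximal occupied depth M: frontiers are nonempty up to M and empty after
lemma pvM_exists (graph : List (String × List String)) (start : String) :
    ∃ m, (pvFW graph start (m+1)).1 = [] := by
  refine ⟨(PySem.Dict.ofList graph).size, ?_⟩
  by_contra h
  have := pvF_keybound graph start ((PySem.Dict.ofList graph).size + 1) h
  omega

-- A's port emits the sorted frontiers at depths 0..M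
lemma pvA_flatten (graph : List (String × List String)) (start : String) :
    bfs_load_order graph start =
      ((List.range (Nat.find (pvM_exists graph start) + 1)).map
        (fun i => PySem.List.sorted (pvFW graph start i).1 (fun x => x))).flatten := by
  unfold bfs_load_order
  have h1 : pvLoopA graph (pvFuel graph) [start] PySem.Set.empty []
      = pvFLoop graph (pvFuel graph) (pvFW graph start 0).1 (pvFW graph start 0).2 [] := by
    apply pvLoop_eq
    refine ⟨pvF_nodup graph start 0, ?_, ?_⟩
    · intro x
      rw [(pvF0 graph start).1]
      simp [PySem.Set.empty]
    · intro x
      rw [(pvF0 graph start).2 x, (pvF0 graph start).1]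
      simp [PySem.Set.empty]
  rw [h1]
  have hMsize : Nat.find (pvM_exists graph start) ≤ (PySem.Dict.ofList graph).size := by
    by_contra hgt
    exact (Nat.find_min (pvM_exists graph start)
      (show (PySem.Dict.ofList graph).size < Nat.find (pvM_exists graph start) by omega))
      (by
        by_contra h
        have := pvF_keybound graph start ((PySem.Dict.ofList graph).size + 1) h
        omega)
  have hfuel : Nat.find (pvM_exists graph start) + 1 ≤ pvFuel graph := by
    have hs := pvSize_ofList_le graph
    unfold pvFuel
    omega
  have h2 := pvFLoop_flatten graph start (Nat.find (pvM_exists graph start) + 1) 0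
    (pvFuel graph) [] (by rw [Nat.zero_add]; exact Nat.find_spec (pvM_exists graph start)) hfuel
  simpa [Nat.zero_add] using h2

-- ===== VERDICT helper: the final assembly =====
theorem pv_main (graph : List (String × List String)) (start : String) :
    bfs_load_order graph start = bfs_load_order_alt graph start := by
  classical
  set M := Nat.find (pvM_exists graph start) with hMdef
  have hFM1 : (pvFW graph start (M+1)).1 = [] := Nat.find_spec (pvM_exists graph start)
  have hFne : ∀ m ≤ M, (pvFW graph start m).1 ≠ [] := by
    intro m hm
    cases m with
    | zero => rw [(pvF0 graph start).1]; simp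
    | succ m' => exact Nat.find_min (pvM_exists graph start) (by omega)
  have hFgt : ∀ m, M < m → (pvFW graph start m).1 = [] := by
    intro m hm
    exact pvF_empty_le graph start (show M + 1 ≤ m by omega) hFM1
  -- B's distance map
  set dist := pvPassesB (PySem.Dict.ofList graph) ((PySem.Dict.ofList graph).size + 1)
    (PySem.Dict.ofList [(start, (0:Int))]) with hdistdef
  have hinvD : pvInvB graph start dist :=
    (pvPasses_progress graph start ((PySem.Dict.ofList graph).size + 1)).1
  have hchar : ∀ (x : String) (v : Int),
      dist.get? x = some v ↔ ∃ n : Nat, v = (n : Int) ∧ x ∈ (pvFW graph start n).1 :=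
    fun x v => pvDist_char graph start x v
  have hndk : dist.keys.Nodup := hinvD.1
  have hdepth_le : ∀ (x : String) (n : Nat), x ∈ (pvFW graph start n).1 → n ≤ M := by
    intro x n hx
    by_contra hgt
    rw [hFgt n (by omega)] at hx
    exact List.not_mem_nil hx
  have hkeymem : ∀ x, x ∈ dist.keys ↔ ∃ n : Nat, x ∈ (pvFW graph start n).1 := by
    intro x
    constructor
    · intro hx
      rcases ho : dist.get? x with _ | v
      · exact absurd hx ((PySem.Dict.get?_eq_none_iff_not_mem_keys dist x).mp ho)
      · obtain ⟨n, -, hF⟩ := (hchar x v).mp ho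
        exact ⟨n, hF⟩
    · rintro ⟨n, hF⟩
      have hsome := (hchar x (n : Int)).mpr ⟨n, rfl, hF⟩
      by_contra hxk
      rw [(PySem.Dict.get?_eq_none_iff_not_mem_keys dist x).mpr hxk] at hsome
      cases hsome
  have hvals : dist.values = dist.keys.map (fun k => dist.getD k 0) :=
    PySem.Dict.values_eq_map_keys dist hndk 0
  have hgetDval : ∀ (x : String) (n : Nat), x ∈ (pvFW graph start n).1 → dist.getD x 0 = (n : Int) := by
    intro x n hF
    rw [PySem.Dict.getD_eq_get?_getD, (hchar x (n : Int)).mpr ⟨n, rfl, hF⟩]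
    rfl
  have hvalle : ∀ y ∈ dist.values, y ≤ (M : Int) := by
    intro y hy
    rw [hvals] at hy
    obtain ⟨k, hk, rfl⟩ := List.mem_map.mp hy
    obtain ⟨n, hF⟩ := (hkeymem k).mp hk
    rw [hgetDval k n hF]
    exact_mod_cast hdepth_le k n hF
  have hMval : (M : Int) ∈ dist.values := by
    obtain ⟨x, hx⟩ := List.exists_mem_of_ne_nil _ (hFne M (le_refl _))
    have hxk : x ∈ dist.keys := (hkeymem x).mpr ⟨M, hx⟩
    rw [hvals]
    exact List.mem_map.mpr ⟨x, hxk, hgetDval x M hx⟩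
  obtain ⟨mval, hm⟩ : ∃ m, PySem.List.max? dist.values (fun v => v) = some m := by
    rcases h : PySem.List.max? dist.values (fun v => v) with _ | m
    · rw [PySem.List.max?_eq_none_iff] at h
      rw [h] at hMval
      cases hMval
    · exact ⟨m, rfl⟩
  have hmax : PySem.List.max? dist.values (fun v => v) = some (M : Int) := by
    rw [hm]
    have h1 : mval ≤ (M : Int) := hvalle mval (PySem.List.max?_mem hm)
    have h2 : (M : Int) ≤ mval := PySem.List.max?_isMax hm (M : Int) hMval
    rw [le_antisymm h1 h2]
  -- the per-level groups agree
  have hlev : ∀ i : Nat,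
      PySem.List.sorted (dist.keys.filter (fun p => dist.get? p == some ((i : Nat) : Int))) (fun x => x)
        = PySem.List.sorted (pvFW graph start i).1 (fun x => x) := by
    intro i
    apply pvSorted_eq_of_mem_iff (hndk.filter _) (pvF_nodup graph start i)
    intro x
    rw [List.mem_filter]
    constructor
    · rintro ⟨-, hbeq⟩
      obtain ⟨n, hni, hF⟩ := (hchar x _).mp (beq_iff_eq.mp hbeq)
      have : i = n := by exact_mod_cast hni
      rwa [this]
    · intro hF
      have hsome := (hchar x ((i : Nat) : Int)).mpr ⟨i, rfl, hF⟩
      refine ⟨(hkeymem x).mpr ⟨i, hF⟩, ?_⟩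
      rw [hsome]
      exact beq_self_eq_true _
    -- B unfolds to the same flatten
  rw [pvA_flatten graph start, ← hMdef]
  show _ = bfs_load_order_alt graph start
  unfold bfs_load_order_alt
  simp only [← hdistdef, hmax]
  have hcast : ((M : Int) + 1) = ((M + 1 : Nat) : Int) := by push_cast; ring
  rw [hcast, PySem.List.pyRange_zero_natCast, PySem.List.foldl_append_eq_flatMap,
    List.nil_append, List.flatMap_def, List.map_map]
  congr 1
  apply List.map_congr_left
  intro i _
  exact (hlev i).symm

-- ===== VERDICT (by name: the statement is the Claim_ definition above) =====
theorem bfs_load_order_spec : Claim_equal_bfs_load_order := by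
  intro graph start_package _
  unfold Spec_bfs_load_order
  exact pv_main graph start_package
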